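-- pv_equiv track=rewrite | github.com/huan5678/wasteland-tarot-app | backend/app/services/line_detection_service.py | create_bitmask
-- ===== SOURCE A (Python) =====
-- from typing import List, Optional, Tuple, Dict, Any, Set
--
-- def create_bitmask(
--
--     card_numbers: List[int],
--     claimed_numbers: List[int]
-- ) -> int:
--     """
--     將賓果卡與已領取號碼轉換為 25-bit 整數遮罩
--
--     Args:
--         card_numbers: 賓果卡上的所有號碼（扁平化的 25 個數字）
--         claimed_numbers: 使用者已領取的號碼列表
--
--     Returns:
--         25-bit 整數，已領取且在卡片上的號碼對應位元為 1
--
--     Example: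
--         card_numbers = [1,2,3,4,5, 6,7,8,9,10, ...]  # 25 個號碼
--         claimed_numbers = [1, 5, 13]
--         如果 1 在位置 0、5 在位置 4、13 在位置 12
--         則 bitmask = 0b0001000000000010001
--     """
--     bitmask = 0
--     claimed_set = set(claimed_numbers)
--
--     for position, number in enumerate(card_numbers):
--         if number in claimed_set:
--             # 將對應位元設為 1
--             bitmask |= (1 << position)
--
--     return bitmask
-- ===== SOURCE B (Python) =====
-- def create_bitmask(card_numbers, claimed_numbers):
--     # Index each card number to the list of all its positions, then OR in the
--     # bits for the claimed numbers via the index (no per-position set test).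
--     positions_by_number = {}
--     for position, number in enumerate(card_numbers):
--         positions_by_number.setdefault(number, []).append(position)
--
--     bitmask = 0
--     for number in set(claimed_numbers):
--         for position in positions_by_number.get(number, ()):
--             bitmask |= 1 << position
--     return bitmask
-- ===== Notes on version B (the rewrite author's own statement) =====
-- stated objective: alternative
-- what changed: B first builds a dict indexing each card number to the list of all its positions, then ORs in 1<<position for each distinct claimed number via the index, instead of scanning the card and testing each position's number against a claimed set.
import Mathlib
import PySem

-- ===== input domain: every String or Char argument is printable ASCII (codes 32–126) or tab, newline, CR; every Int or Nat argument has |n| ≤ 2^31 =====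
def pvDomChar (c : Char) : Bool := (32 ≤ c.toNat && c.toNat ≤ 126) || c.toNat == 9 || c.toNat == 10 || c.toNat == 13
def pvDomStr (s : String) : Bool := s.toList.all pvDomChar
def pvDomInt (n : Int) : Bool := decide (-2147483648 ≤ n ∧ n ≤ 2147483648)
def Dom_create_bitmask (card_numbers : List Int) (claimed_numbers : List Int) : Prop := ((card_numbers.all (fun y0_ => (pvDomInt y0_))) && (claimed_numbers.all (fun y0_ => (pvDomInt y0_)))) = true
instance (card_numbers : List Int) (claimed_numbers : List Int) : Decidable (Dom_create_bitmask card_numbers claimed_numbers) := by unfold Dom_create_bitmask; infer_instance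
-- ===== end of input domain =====

-- B replaces the per-position membership test by a prebuilt number→positions index
-- that is OR-ed in per claimed number (objective: alternative decomposition).

-- ===== PORT A =====
def create_bitmask (card_numbers : List Int) (claimed_numbers : List Int) : Int :=
  let claimed_set : PySem.Set Int := PySem.Set.ofList claimed_numbers
  (PySem.List.enumerate card_numbers).foldl
    (fun bitmask pn =>
      if claimed_set.contains pn.2 then PySem.Int.bor bitmask ((1 : Int) <<< pn.1.toNat)
      else bitmask) 0

-- ===== PORT B =====
def create_bitmask_alt (card_numbers : List Int) (claimed_numbers : List Int) : Int :=
  let index : PySem.Dict Int (List Int) :=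
    (PySem.List.enumerate card_numbers).foldl
      (fun d pn => d.insert pn.2 (d.getD pn.2 [] ++ [pn.1])) PySem.Dict.empty
  (PySem.Set.ofList claimed_numbers).foldl
    (fun bitmask n =>
      (index.getD n []).foldl
        (fun bm p => PySem.Int.bor bm ((1 : Int) <<< p.toNat)) bitmask) 0

-- ===== PRECONDITION & SPEC =====
def Spec_create_bitmask (card_numbers : List Int) (claimed_numbers : List Int) (out : Int) : Prop := out = create_bitmask_alt card_numbers claimed_numbers
instance (card_numbers : List Int) (claimed_numbers : List Int) (out : Int) : Decidable (Spec_create_bitmask card_numbers claimed_numbers out) := by unfold Spec_create_bitmask; infer_instance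

-- ===== CLAIM (what is proved, stated in full; the proofs are below) =====
def Claim_equal_create_bitmask : Prop := ∀ (card_numbers : List Int) (claimed_numbers : List Int), Dom_create_bitmask card_numbers claimed_numbers → Spec_create_bitmask card_numbers claimed_numbers (create_bitmask card_numbers claimed_numbers)

-- ===== LEMMAS AND PROOFS =====

-- The index built by B maps n to the positions (first components) of the entries of E
-- whose number (second component) is n, in order.
theorem pv_index_getD (E : List (Int × Int)) :
    ∀ (d : PySem.Dict Int (List Int)) (n : Int),
      (E.foldl (fun d pn => d.insert pn.2 (d.getD pn.2 [] ++ [pn.1])) d).getD n []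
        = d.getD n [] ++ (E.filter (fun pn => pn.2 == n)).map (·.1) := by
  induction E with
  | nil => intro d n; simp
  | cons pn E ih =>
    intro d n
    simp only [List.foldl_cons, List.filter_cons]
    by_cases h : pn.2 = n
    · simp [ih, h]
    · simp [ih, PySem.Dict.getD_insert, h, Ne.symm h]

-- Folding `|= 1 << key x` over Int accumulators is the corresponding Nat fold.
theorem pv_fold_to_nat {α : Type} (key : α → Nat) :
    ∀ (l : List α) (acc : Nat),
      l.foldl (fun a x => PySem.Int.bor a ((1 : Int) <<< ((key x : Nat) : Int))) (acc : Int)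
        = ((l.foldl (fun a x => a ||| (1 <<< key x)) acc : Nat) : Int) := by
  intro l
  induction l with
  | nil => intro acc; rfl
  | cons x l ih =>
    intro acc
    simp only [List.foldl_cons]
    have h1 : (1 : Int) <<< ((key x : Nat) : Int) = ((1 <<< key x : Nat) : Int) := by
      rw [show (1 : Int) = ((1 : Nat) : Int) from rfl, Int.shiftLeft_natCast]
    rw [h1, PySem.Int.bor_natCast, ih]

-- Splitting a filter over a disjunction of disjoint predicates, up to permutation.
theorem pv_filter_or_perm (n : Int) (S : List Int) (hn : n ∉ S) :
    ∀ (E : List (Int × Int)),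
      (E.filter (fun pn => pn.2 == n || decide (pn.2 ∈ S))).Perm
        (E.filter (fun pn => pn.2 == n) ++ E.filter (fun pn => decide (pn.2 ∈ S))) := by
  intro E
  induction E with
  | nil => simp
  | cons pn E ih =>
    simp only [List.filter_cons]
    by_cases h1 : pn.2 = n
    · have h2 : pn.2 ∉ S := h1 ▸ hn
      have e1 : (pn.2 == n) = true := by simp [h1]
      have e2 : decide (pn.2 ∈ S) = false := by simp [h2]
      simp only [e1, e2, Bool.true_or, if_true, List.cons_append]
      exact ih.cons pn
    · have e1 : (pn.2 == n) = false := by simp [h1]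
      by_cases h2 : pn.2 ∈ S
      · have e2 : decide (pn.2 ∈ S) = true := by simp [h2]
        simp only [e1, e2, Bool.false_or, if_true]
        exact (ih.cons pn).trans List.perm_middle.symm
      · have e2 : decide (pn.2 ∈ S) = false := by simp [h2]
        simp only [e1, e2, Bool.false_or]
        exact ih

-- For a duplicate-free list S of numbers, grouping E's entries by each n ∈ S is a
-- permutation of filtering E by membership in S.
theorem pv_group_perm :
    ∀ (S : List Int), S.Nodup → ∀ (E : List (Int × Int)),
      (S.flatMap (fun n => E.filter (fun pn => pn.2 == n))).Perm
        (E.filter (fun pn => decide (pn.2 ∈ S))) := by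
  intro S
  induction S with
  | nil => intro _ E; simp
  | cons n S ih =>
    intro hnd E
    have hn : n ∉ S := (List.nodup_cons.mp hnd).1
    have hS : S.Nodup := (List.nodup_cons.mp hnd).2
    have hpred : E.filter (fun pn => decide (pn.2 ∈ n :: S))
        = E.filter (fun pn => pn.2 == n || decide (pn.2 ∈ S)) := by
      apply List.filter_congr
      intro pn _
      by_cases h : pn.2 = n <;> simp [List.mem_cons, h]
    rw [hpred, List.flatMap_cons]
    exact ((ih hS E).append_left _).trans (pv_filter_or_perm n S hn E).symm

-- ===== VERDICT (by name: the statement is the Claim_ definition above) =====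
theorem create_bitmask_spec : Claim_equal_create_bitmask := by
  intro card_numbers claimed_numbers _
  unfold Spec_create_bitmask create_bitmask create_bitmask_alt
  simp only [pv_index_getD, PySem.Dict.getD_empty, List.nil_append, ← List.foldl_flatMap]
  rw [← List.map_flatMap, List.foldl_map, ← List.foldl_filter]
  have hc : (PySem.List.enumerate card_numbers).filter
        (fun pn => (PySem.Set.ofList claimed_numbers).contains pn.2)
      = (PySem.List.enumerate card_numbers).filter
        (fun pn => decide (pn.2 ∈ PySem.Set.ofList claimed_numbers)) := by
    apply List.filter_congr
    intro pn _
    exact PySem.Set.contains_eq_decide _ _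
  rw [hc]
  rw [show (0 : Int) = ((0 : Nat) : Int) from rfl,
      pv_fold_to_nat (fun pn : Int × Int => pn.1.toNat),
      pv_fold_to_nat (fun pn : Int × Int => pn.1.toNat)]
  congr 1
  letI : RightCommutative (fun (a : Nat) (pn : Int × Int) => a ||| (1 <<< pn.1.toNat)) :=
    ⟨fun a b c => by
      simp only [Nat.lor_assoc]
      rw [Nat.lor_comm (1 <<< b.1.toNat)]⟩
  exact (pv_group_perm (PySem.Set.ofList claimed_numbers)
      (PySem.Set.nodup_ofList claimed_numbers)
      (PySem.List.enumerate card_numbers)).symm.foldl_eq 0
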